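-- pv_equiv track=rewrite | github.com/v1eira/adt-matrix | matrix.py | rotateColumnRight
-- ===== SOURCE A (Python) =====
-- def rotateColumnRight(matrix, times = 1):
-- 	for x in range(times):
-- 		for i in range(len(matrix)):
-- 			for j in range(len(matrix[i])):
-- 				original = matrix[i][j]
-- 				matrix[i][j] = matrix[i][len(matrix[i])-1]
-- 				matrix[i][len(matrix[i])-1] = original
--
-- 	return matrix
-- ===== SOURCE B (Python) =====
-- def rotateColumnRight(matrix, times = 1):
--     # Each of A's passes rotates every row right by one; do all passes at once
--     # by slicing each row at t mod len(row).  (A mutates rows in place; B rebinds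
--     # matrix's slots to new row lists -- return value is identical.)
--     t = max(times, 0)
--     matrix[:] = [row[len(row) - t % len(row):] + row[:len(row) - t % len(row)] if row else row
--                  for row in matrix]
--     return matrix
-- ===== Notes on version B (the rewrite author's own statement) =====
-- stated objective: faster
-- what changed: Replaces times nested swap passes with a single slicing pass that rotates each row right by times mod len(row).
import Mathlib
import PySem

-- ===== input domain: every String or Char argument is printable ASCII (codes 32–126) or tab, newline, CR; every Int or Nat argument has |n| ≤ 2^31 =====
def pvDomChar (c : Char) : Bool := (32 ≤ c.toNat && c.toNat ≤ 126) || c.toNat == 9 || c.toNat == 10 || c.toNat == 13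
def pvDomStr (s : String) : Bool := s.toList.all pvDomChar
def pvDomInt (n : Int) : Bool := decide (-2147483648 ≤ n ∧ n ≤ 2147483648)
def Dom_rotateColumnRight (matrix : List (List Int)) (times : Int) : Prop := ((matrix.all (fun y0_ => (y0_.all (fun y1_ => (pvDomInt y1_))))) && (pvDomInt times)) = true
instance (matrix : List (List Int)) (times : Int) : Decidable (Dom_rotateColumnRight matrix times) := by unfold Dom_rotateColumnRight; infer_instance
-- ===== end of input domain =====

-- B replaces A's `times` nested swap passes by one slicing pass per row (rotate right
-- by times mod width); A mutates rows in place, B rebinds matrix's slots -- return value equal.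
-- ===== PORT A =====
-- original = matrix[i][j]; matrix[i][j] = matrix[i][len-1]; matrix[i][len-1] = original
def pvSwapStep (r : List Int) (j : Nat) : List Int :=
  let original := r.getD j 0
  let r1 := r.set j (r.getD (r.length - 1) 0)
  r1.set (r1.length - 1) original

-- inner loop `for j in range(len(matrix[i]))`
def pvRowPassA (row : List Int) : List Int :=
  (List.range row.length).foldl pvSwapStep row

-- middle loop `for i in range(len(matrix))`
def pvPassA (m : List (List Int)) : List (List Int) :=
  (List.range m.length).foldl (fun m i => m.set i (pvRowPassA (m.getD i []))) m

-- outer loop `for x in range(times)` (empty when times <= 0)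
def rotateColumnRight (matrix : List (List Int)) (times : Int) : List (List Int) :=
  (List.range times.toNat).foldl (fun m _ => pvPassA m) matrix

-- ===== PORT B =====
-- row[n - t % n :] + row[: n - t % n] for nonempty row (t = max(times, 0))
def pvRotRowB (row : List Int) (t : Nat) : List Int :=
  if row.isEmpty then row
  else row.drop (row.length - t % row.length) ++ row.take (row.length - t % row.length)

def rotateColumnRight_alt (matrix : List (List Int)) (times : Int) : List (List Int) :=
  matrix.map (fun row => pvRotRowB row times.toNat)

-- ===== PRECONDITION & SPEC =====
def Spec_rotateColumnRight (matrix : List (List Int)) (times : Int) (out : List (List Int)) : Prop := out = rotateColumnRight_alt matrix times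
instance (matrix : List (List Int)) (times : Int) (out : List (List Int)) : Decidable (Spec_rotateColumnRight matrix times out) := by unfold Spec_rotateColumnRight; infer_instance

-- ===== CLAIM (what is proved, stated in full; the proofs are below) =====
def Claim_equal_rotateColumnRight : Prop := ∀ (matrix : List (List Int)) (times : Int), Dom_rotateColumnRight matrix times → Spec_rotateColumnRight matrix times (rotateColumnRight matrix times)

-- ===== LEMMAS AND PROOFS =====

theorem pv_swapStep_eq (p : List Int) (b : Int) (l : List Int) (acc : Int) :
    pvSwapStep (p ++ b :: (l ++ [acc])) p.length = (p ++ acc :: l) ++ [b] := by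
  simp [pvSwapStep]

-- the inner loop: the last slot acts as an accumulator swapped through positions 0..n-2
theorem pv_swap_fold (u : List Int) : ∀ (p : List Int) (acc : Int),
    (List.range' p.length (u.length + 1)).foldl pvSwapStep (p ++ u ++ [acc]) = p ++ acc :: u := by
  induction u with
  | nil =>
    intro p acc
    simp [List.range', pvSwapStep]
  | cons b u' ih =>
    intro p acc
    rw [List.length_cons, List.range'_succ, List.foldl_cons]
    have hstep := pv_swapStep_eq p b u' acc
    have h2 := ih (p ++ [acc]) b
    simp only [List.length_append, List.length_cons, List.length_nil] at h2
    rw [show p ++ b :: u' ++ [acc] = p ++ b :: (u' ++ [acc]) by simp, hstep]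
    simpa using h2

theorem pv_rowPassA_eq (u : List Int) (acc : Int) :
    pvRowPassA (u ++ [acc]) = acc :: u := by
  have h := pv_swap_fold u [] acc
  simpa [pvRowPassA, List.range_eq_range'] using h

-- the middle loop is a map over the rows
theorem pv_pass_fold (u : List (List Int)) : ∀ (p : List (List Int)),
    (List.range' p.length u.length).foldl (fun m i => m.set i (pvRowPassA (m.getD i []))) (p ++ u)
      = p ++ u.map pvRowPassA := by
  induction u with
  | nil => intro p; simp
  | cons b u' ih =>
    intro p
    rw [List.length_cons, List.range'_succ, List.foldl_cons]
    have h2 := ih (p ++ [pvRowPassA b])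
    simp only [List.length_append, List.length_cons, List.length_nil] at h2
    have hget : (p ++ b :: u').getD p.length [] = b := by simp
    have hset : (p ++ b :: u').set p.length (pvRowPassA b) = p ++ pvRowPassA b :: u' := by simp
    simp only [hget, hset]
    rw [show p ++ pvRowPassA b :: u' = p ++ [pvRowPassA b] ++ u' by simp]
    simpa using h2

theorem pv_passA_eq (m : List (List Int)) : pvPassA m = m.map pvRowPassA := by
  have h := pv_pass_fold m []
  simpa [pvPassA, List.range_eq_range'] using h

theorem pv_foldl_const_iterate {α : Type} (f : α → α) (t : Nat) (x : α) :
    (List.range t).foldl (fun a _ => f a) x = f^[t] x := by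
  induction t generalizing x with
  | zero => rfl
  | succ n ih => rw [List.range_succ, List.foldl_append, ih, Function.iterate_succ_apply']; rfl

theorem pv_map_iterate {α : Type} (f : α → α) (t : Nat) (m : List α) :
    (List.map f)^[t] m = m.map f^[t] := by
  induction t generalizing m with
  | zero => simp
  | succ n ih => rw [Function.iterate_succ_apply, ih, Function.iterate_succ, List.map_map]

theorem pv_rowPassA_nil : pvRowPassA [] = [] := by simp [pvRowPassA]

-- one swap pass moves the slicing point of a rotated row one step left
theorem pv_step_rot (row : List Int) (m : Nat) (hm : m < row.length) :
    pvRowPassA (row.drop (row.length - m) ++ row.take (row.length - m))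
      = row.drop (row.length - m - 1) ++ row.take (row.length - m - 1) := by
  obtain ⟨s, hs1, hs2⟩ : ∃ s, s < row.length ∧ row.length - m = s + 1 :=
    ⟨row.length - m - 1, by omega, by omega⟩
  have hss : row.length - m - 1 = s := by omega
  rw [hss, hs2]
  have htake : row.take (s + 1) = row.take s ++ [row[s]'hs1] := by
    rw [List.take_add_one, List.getElem?_eq_getElem hs1]
    rfl
  have hdrop : row.drop s = row[s]'hs1 :: row.drop (s + 1) := List.drop_eq_getElem_cons hs1
  rw [htake, ← List.append_assoc, pv_rowPassA_eq, hdrop, List.cons_append]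

-- t swap passes rotate a row right by t mod its length
theorem pv_row_iterate (row : List Int) (t : Nat) :
    pvRowPassA^[t] row = pvRotRowB row t := by
  rcases eq_or_ne row [] with hne | hne
  · subst hne
    simp [pvRotRowB, Function.iterate_fixed pv_rowPassA_nil t]
  · have hn : 0 < row.length := List.length_pos_of_ne_nil hne
    have hB : ∀ s : Nat, pvRotRowB row s
        = row.drop (row.length - s % row.length) ++ row.take (row.length - s % row.length) := by
      intro s
      simp [pvRotRowB, List.isEmpty_iff, hne]
    induction t with
    | zero => simp [hB 0]
    | succ k ih =>
      rw [Function.iterate_succ_apply', ih, hB k, hB (k + 1)]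
      have hm : k % row.length < row.length := Nat.mod_lt _ hn
      have hmod : (k + 1) % row.length = (k % row.length + 1) % row.length := by
        rw [Nat.add_mod, Nat.add_mod (k % row.length) 1, Nat.mod_mod_of_dvd _ dvd_rfl]
      rw [pv_step_rot row (k % row.length) hm]
      by_cases hlast : k % row.length + 1 = row.length
      · have h0 : (k + 1) % row.length = 0 := by rw [hmod, hlast, Nat.mod_self]
        have hs0 : row.length - k % row.length - 1 = 0 := by omega
        rw [h0, hs0]
        simp
      · have h1 : (k + 1) % row.length = k % row.length + 1 := by
          rw [hmod, Nat.mod_eq_of_lt (by omega)]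
        rw [h1, show row.length - k % row.length - 1 = row.length - (k % row.length + 1) by omega]

-- ===== VERDICT (by name: the statement is the Claim_ definition above) =====
theorem rotateColumnRight_spec : Claim_equal_rotateColumnRight := by
  intro matrix times _
  unfold Spec_rotateColumnRight rotateColumnRight rotateColumnRight_alt
  rw [pv_foldl_const_iterate]
  have hpass : pvPassA = List.map pvRowPassA := funext pv_passA_eq
  rw [hpass, pv_map_iterate]
  exact List.map_congr_left (fun row _ => pv_row_iterate row times.toNat)
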